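-- pv_equiv track=rewrite | github.com/MansonX/benchmark-mindie-old | utils.py | process_case_batch
-- ===== SOURCE A (Python) =====
-- def process_case_batch(case_pair, input_list):
--     if len(case_pair) != len(input_list):
--         raise ValueError("inconsistent case_pair and batch_size input, length should be the same")
--     sorted_batch = [sorted(bs, reverse=True) for bs in input_list]
--     combined = list(zip(case_pair, sorted_batch))
--     combined.sort(key=lambda x: sum(x[0]), reverse=True)
--     sorted_case_pair = [pair for pair, _ in combined]
--     sorted_input_list = [bs for _, bs in combined]
--     return sorted_case_pair, sorted_input_list
-- ===== SOURCE B (Python) =====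
-- def process_case_batch(case_pair, input_list):
--     if len(case_pair) != len(input_list):
--         raise ValueError("inconsistent case_pair and batch_size input, length should be the same")
--     ranked = []  # kept in descending-sum order by stable online insertion
--     for pair, bs in zip(case_pair, input_list):
--         s = sum(pair)
--         j = 0
--         while j < len(ranked) and ranked[j][0] >= s:
--             j += 1
--         ranked.insert(j, (s, pair, sorted(bs, reverse=True)))
--     return [p for _, p, _ in ranked], [b for _, _, b in ranked]
-- ===== Notes on version B (the rewrite author's own statement) =====
-- stated objective: alternative
-- what changed: B replaces A's build-all/zip/library-sort/unzip pipeline with a single online pass: each (pair, batch) is inserted into a descending-sum accumulator by a stable linear insertion (a hand-written insertion sort keyed on the precomputed sum), then the two outputs are projected from the accumulator.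
import Mathlib
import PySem

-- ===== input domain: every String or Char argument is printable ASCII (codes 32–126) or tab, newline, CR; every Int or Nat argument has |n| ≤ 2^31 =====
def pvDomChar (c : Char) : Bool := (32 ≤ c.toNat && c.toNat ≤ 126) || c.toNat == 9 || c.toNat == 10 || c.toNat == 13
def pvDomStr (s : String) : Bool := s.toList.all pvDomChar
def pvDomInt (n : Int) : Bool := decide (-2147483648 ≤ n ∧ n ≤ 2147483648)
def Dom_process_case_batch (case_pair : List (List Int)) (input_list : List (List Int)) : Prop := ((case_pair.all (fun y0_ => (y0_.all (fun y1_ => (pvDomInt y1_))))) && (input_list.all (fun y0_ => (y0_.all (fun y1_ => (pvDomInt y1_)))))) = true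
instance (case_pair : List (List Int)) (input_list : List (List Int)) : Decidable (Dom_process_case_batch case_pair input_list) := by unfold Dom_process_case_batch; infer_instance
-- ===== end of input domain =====

-- B replaces A's build-all/zip/library-sort/unzip pipeline with one online pass that stably
-- inserts each (sum, pair, sorted batch) triple into a descending-sum accumulator
-- (hand-written insertion sort), then projects the two outputs ("alternative", same result).

-- ===== PORT A =====
def process_case_batch (case_pair : List (List Int)) (input_list : List (List Int)) : List (List Int) × List (List Int) :=
  let sorted_batch := input_list.map (fun bs => PySem.List.sorted bs (fun x => x) true)
  let combined := case_pair.zip sorted_batch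
  let combined := PySem.List.sorted combined (fun x => x.1.sum) true
  let sorted_case_pair := combined.map (fun x => x.1)
  let sorted_input_list := combined.map (fun x => x.2)
  (sorted_case_pair, sorted_input_list)

-- ===== PORT B =====
-- B's while loop: skip the prefix of entries whose stored sum is ≥ the new sum, insert there
def pvInsertDesc (entry : Int × List Int × List Int) (acc : List (Int × List Int × List Int)) :
    List (Int × List Int × List Int) :=
  match acc with
  | [] => [entry]
  | y :: ys => if y.1 ≥ entry.1 then y :: pvInsertDesc entry ys else entry :: y :: ys

def process_case_batch_alt (case_pair : List (List Int)) (input_list : List (List Int)) : List (List Int) × List (List Int) :=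
  let ranked := (case_pair.zip input_list).foldl
    (fun acc x =>
      let s := x.1.sum
      pvInsertDesc (s, x.1, PySem.List.sorted x.2 (fun v => v) true) acc) []
  (ranked.map (fun t => t.2.1), ranked.map (fun t => t.2.2))

-- ===== PRECONDITION & SPEC =====
-- A raises ValueError when the two lists have different lengths; Pre_ excludes exactly those inputs (B raises there too).
def Pre_process_case_batch (case_pair : List (List Int)) (input_list : List (List Int)) : Prop :=
  case_pair.length = input_list.length
instance (case_pair : List (List Int)) (input_list : List (List Int)) : Decidable (Pre_process_case_batch case_pair input_list) := by unfold Pre_process_case_batch; infer_instance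

def pvWitness_process_case_batch : List (List Int) × List (List Int) := ([[1, 2], [5]], [[3, 4], [0, 7]])

def Spec_process_case_batch (case_pair : List (List Int)) (input_list : List (List Int)) (out : List (List Int) × List (List Int)) : Prop := out = process_case_batch_alt case_pair input_list
instance (case_pair : List (List Int)) (input_list : List (List Int)) (out : List (List Int) × List (List Int)) : Decidable (Spec_process_case_batch case_pair input_list out) := by unfold Spec_process_case_batch; infer_instance

-- ===== CLAIM (what is proved, stated in full; the proofs are below) =====
def Claim_equal_process_case_batch : Prop := ∀ (case_pair : List (List Int)) (input_list : List (List Int)), Dom_process_case_batch case_pair input_list → Pre_process_case_batch case_pair input_list → Spec_process_case_batch case_pair input_list (process_case_batch case_pair input_list)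

-- ===== LEMMAS AND PROOFS =====

-- B's hand-written insertion is PySem's insertBy under the "stored sum strictly smaller" test
theorem pvInsertDesc_eq_insertBy (e : Int × List Int × List Int)
    (acc : List (Int × List Int × List Int)) :
    pvInsertDesc e acc = PySem.List.insertBy (fun a b => decide (b.1 < a.1)) e acc := by
  induction acc with
  | nil => rfl
  | cons y ys ih =>
    simp only [pvInsertDesc, PySem.List.insertBy]
    by_cases h : y.1 ≥ e.1
    · have : ¬ (y.1 < e.1) := not_lt.mpr h
      simp [h, this, ih]
    · have : y.1 < e.1 := lt_of_not_ge h
      simp [h, this]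

-- insertBy commutes with a map whose comparison is transported along g
theorem pv_insertBy_map {α β : Type} (g : α → β) (p : α → α → Bool) (q : β → β → Bool)
    (h : ∀ a b, q (g a) (g b) = p a b) (x : α) (ys : List α) :
    PySem.List.insertBy q (g x) (ys.map g) = (PySem.List.insertBy p x ys).map g := by
  induction ys with
  | nil => simp [PySem.List.insertBy]
  | cons y ys ih =>
    simp only [List.map_cons, PySem.List.insertBy, h]
    by_cases hc : p x y = true
    · simp [hc]
    · simp [hc, ih]

-- folding insertBy of (g (f x)) over a list equals the map by g of folding insertBy of (f x)
theorem pv_foldl_insertBy_map {α β γ : Type} (g : α → β) (f : γ → α)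
    (p : α → α → Bool) (q : β → β → Bool)
    (h : ∀ a b, q (g a) (g b) = p a b) (l : List γ) (acc : List α) :
    List.foldl (fun acc x => PySem.List.insertBy q (g (f x)) acc) (acc.map g) l =
      (List.foldl (fun acc x => PySem.List.insertBy p (f x) acc) acc l).map g := by
  induction l generalizing acc with
  | nil => simp
  | cons x l ih =>
    simp only [List.foldl_cons]
    rw [pv_insertBy_map g p q h (f x) acc]
    exact ih _

-- ===== VERDICT (by name: the statement is the Claim_ definition above) =====
theorem process_case_batch_spec : Claim_equal_process_case_batch := by
  intro cp il _ _
  unfold Spec_process_case_batch process_case_batch process_case_batch_alt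
  simp only []
  -- rewrite A's library sort as a foldl of insertBy (definitional), over the zipped raw list
  rw [PySem.List.sorted_rev_eq_foldl_insertBy]
  rw [List.zip_map_right, List.foldl_map]
  -- rewrite B's hand-written insertion as insertBy
  have hB : ∀ (l : List (List Int × List Int)) (acc : List (Int × List Int × List Int)),
      List.foldl (fun acc x =>
        pvInsertDesc (x.1.sum, x.1, PySem.List.sorted x.2 (fun v => v) true) acc) acc l =
      List.foldl (fun acc x =>
        PySem.List.insertBy (fun a b : Int × List Int × List Int => decide (b.1 < a.1))
          ((fun y : List Int × List Int => (y.1.sum, y.1, y.2))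
            ((fun x : List Int × List Int => (x.1, PySem.List.sorted x.2 (fun v => v) true)) x))
          acc) acc l := by
    intro l acc
    simp only [pvInsertDesc_eq_insertBy]
  rw [hB]
  -- transport B's fold over triples to A's fold over (pair, sorted batch) pairs along G
  have hfold := pv_foldl_insertBy_map
    (fun y : List Int × List Int => (y.1.sum, y.1, y.2))
    (fun x : List Int × List Int => (x.1, PySem.List.sorted x.2 (fun v => v) true))
    (fun a b : List Int × List Int => decide (b.1.sum < a.1.sum))
    (fun a b : Int × List Int × List Int => decide (b.1 < a.1))
    (fun a b => rfl) (cp.zip il) []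
  simp only [List.map_nil] at hfold
  rw [hfold]
  simp [List.map_map, Function.comp_def, Prod.map]
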